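-- pv_equiv track=rewrite | github.com/pitris90/map_editor | attribute_editor.py | get_insert_row_idx
-- ===== SOURCE A (Python) =====
-- PROPS = "props"
--
-- class IdxError(ValueError):
--     """Raised when the value of the index is not expected"""
--
--     pass
--
-- def get_insert_row_idx(sidebar_children: list) -> tuple[int, int]:
--     last_id = None
--     add_dropdown = None
--     for i in range(len(sidebar_children)):
--         id = sidebar_children[i][PROPS].get("id")
--         if id is not None:
--             if "attr_row_index" in id:
--                 last_id = int(id[len("attr_row_index"):])
--             elif id == "attribute-type-dropdown":
--                 add_dropdown = i
--                 break
--     if add_dropdown is None: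
--         raise IdxError()
--     if last_id is None:
--         last_id = add_dropdown - 1
--     else:
--         last_id += 1
--     return add_dropdown, last_id
-- ===== SOURCE B (Python) =====
-- PROPS = "props"
--
--
-- class IdxError(ValueError):
--     """Raised when the value of the index is not expected"""
--
--     pass
--
--
-- def get_insert_row_idx(sidebar_children: list) -> tuple[int, int]:
--     add_dropdown = next(
--         (i for i, child in enumerate(sidebar_children)
--          if child[PROPS].get("id") == "attribute-type-dropdown"),
--         None,
--     )
--     if add_dropdown is None:
--         raise IdxError()
--     last_id = None
--     for child in sidebar_children[:add_dropdown]: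
--         id = child[PROPS].get("id")
--         if id is not None and "attr_row_index" in id:
--             last_id = int(id[len("attr_row_index"):])
--     return add_dropdown, add_dropdown - 1 if last_id is None else last_id + 1
-- ===== Notes on version B (the rewrite author's own statement) =====
-- stated objective: alternative
-- what changed: Replaces A's single fused index loop with break and mixed state by two differently-scoped passes: next/enumerate finds the dropdown index first, then a plain scan over the [:add_dropdown] slice computes the last attr_row_index id.
import Mathlib
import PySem

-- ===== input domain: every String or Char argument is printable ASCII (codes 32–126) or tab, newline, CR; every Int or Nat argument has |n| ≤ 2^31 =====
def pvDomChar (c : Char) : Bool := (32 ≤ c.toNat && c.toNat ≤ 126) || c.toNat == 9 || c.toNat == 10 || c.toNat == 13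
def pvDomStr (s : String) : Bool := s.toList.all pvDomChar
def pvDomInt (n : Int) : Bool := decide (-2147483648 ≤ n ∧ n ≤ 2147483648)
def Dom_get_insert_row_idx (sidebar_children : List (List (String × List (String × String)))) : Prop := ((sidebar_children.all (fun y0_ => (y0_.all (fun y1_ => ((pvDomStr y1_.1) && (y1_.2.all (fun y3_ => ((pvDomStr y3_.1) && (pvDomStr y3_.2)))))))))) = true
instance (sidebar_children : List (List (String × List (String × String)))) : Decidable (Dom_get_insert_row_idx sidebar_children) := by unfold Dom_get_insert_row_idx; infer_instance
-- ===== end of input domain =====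

-- B replaces A's single fused break-loop by two differently-scoped passes (find the dropdown index
-- first, then scan the prefix for the last attr_row_index id); same cost, different decomposition.

-- shared helper: child[PROPS].get("id")  (none where the Python value is absent; a missing
-- "props" key is a KeyError in Python and is excluded by Pre_ for the indices that are reached)
def pvId (c : List (String × List (String × String))) : Option String :=
  ((PySem.Dict.mk c).get? "props").bind (fun p => (PySem.Dict.mk p).get? "id")

-- ===== PORT A =====
-- A's loop: for i in range(len(sc)) with state (add_dropdown, last_id) and a break at the dropdown.
-- last_id is Option Int: PySem.Int.ofStr? models int(...) (none = ValueError, excluded by Pre_).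
def pvA_go (rest : List (List (String × List (String × String)))) (i : Int) (last_id : Option Int) :
    Option Int × Option Int :=
  match rest with
  | [] => (none, last_id)
  | c :: rest' =>
    match pvId c with
    | some id =>
        if PySem.Str.isIn "attr_row_index" id then
          pvA_go rest' (i + 1) (PySem.Int.ofStr? (PySem.Str.slice id (some 14) none))
        else if id = "attribute-type-dropdown" then (some i, last_id)
        else pvA_go rest' (i + 1) last_id
    | none => pvA_go rest' (i + 1) last_id

def get_insert_row_idx (sidebar_children : List (List (String × List (String × String)))) : Int × Int :=
  match pvA_go sidebar_children 0 none with
  | (some ad, some l) => (ad, l + 1)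
  | (some ad, none) => (ad, ad - 1)
  | (none, _) => (-1, -1)   -- Python raises IdxError here; excluded by Pre_

-- ===== PORT B =====
-- first pass: next((i for i, child in enumerate(sc) if child[PROPS].get("id") == dropdown), None)
def pvB_isDropdown (c : List (String × List (String × String))) : Bool :=
  pvId c == some "attribute-type-dropdown"

-- second pass body: update last_id on attr_row_index ids
def pvB_step (acc : Option Int) (c : List (String × List (String × String))) : Option Int :=
  match pvId c with
  | some id =>
      if PySem.Str.isIn "attr_row_index" id then
        PySem.Int.ofStr? (PySem.Str.slice id (some 14) none)
      else acc
  | none => acc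

def get_insert_row_idx_alt (sidebar_children : List (List (String × List (String × String)))) : Int × Int :=
  match sidebar_children.findIdx? pvB_isDropdown with
  | none => (-1, -1)   -- Python raises IdxError here; excluded by Pre_
  | some j =>
    match (sidebar_children.take j).foldl pvB_step none with
    | none => ((j : Int), (j : Int) - 1)
    | some v => ((j : Int), v + 1)

-- ===== PRECONDITION & SPEC =====
-- per-child condition for the children scanned before the dropdown: the "props" key exists
-- (else KeyError) and any attr_row_index id has an int-parseable suffix (else ValueError)
def pvOkChild (c : List (String × List (String × String))) : Bool :=
  (PySem.Dict.mk c).contains "props" &&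
    (match pvId c with
     | some s =>
         !(PySem.Str.isIn "attr_row_index" s) ||
           (PySem.Int.ofStr? (PySem.Str.slice s (some 14) none)).isSome
     | none => true)

-- Pre_: exactly the inputs on which Python A returns normally — some child carries the dropdown id
-- and every child before it neither misses "props" (KeyError) nor carries an unparseable
-- attr_row_index suffix (ValueError); otherwise A raises (IdxError/KeyError/ValueError).
def Pre_get_insert_row_idx (sidebar_children : List (List (String × List (String × String)))) : Prop :=
  ∃ j < sidebar_children.length,
    pvId (sidebar_children.getD j []) = some "attribute-type-dropdown" ∧
    ∀ i < j, pvOkChild (sidebar_children.getD i []) = true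

instance (sidebar_children : List (List (String × List (String × String)))) : Decidable (Pre_get_insert_row_idx sidebar_children) := by unfold Pre_get_insert_row_idx; infer_instance

def pvWitness_get_insert_row_idx : (List (List (String × List (String × String)))) :=
  [[("props", [("id", "attr_row_index4")])], [("props", [("id", "attribute-type-dropdown")])]]

def Spec_get_insert_row_idx (sidebar_children : List (List (String × List (String × String)))) (out : Int × Int) : Prop := out = get_insert_row_idx_alt sidebar_children
instance (sidebar_children : List (List (String × List (String × String)))) (out : Int × Int) : Decidable (Spec_get_insert_row_idx sidebar_children out) := by unfold Spec_get_insert_row_idx; infer_instance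

-- ===== CLAIM (what is proved, stated in full; the proofs are below) =====
def Claim_equal_get_insert_row_idx : Prop := ∀ (sidebar_children : List (List (String × List (String × String)))), Dom_get_insert_row_idx sidebar_children → Pre_get_insert_row_idx sidebar_children → Spec_get_insert_row_idx sidebar_children (get_insert_row_idx sidebar_children)

-- ===== LEMMAS AND PROOFS =====

-- the dropdown id does not contain "attr_row_index", so A's elif is reached exactly on B's predicate
lemma pv_dropdown_not_attr :
    ¬ PySem.Str.isIn "attr_row_index" "attribute-type-dropdown" = true := by decide

-- characterisation of A's fused loop by B's two passes (any start index, any accumulator)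
lemma pvA_go_eq (sc : List (List (String × List (String × String)))) :
    ∀ (i : Int) (acc : Option Int),
      pvA_go sc i acc =
        match sc.findIdx? pvB_isDropdown with
        | none => (none, sc.foldl pvB_step acc)
        | some j => (some (i + (j : Int)), (sc.take j).foldl pvB_step acc) := by
  induction sc with
  | nil => intro i acc; simp [pvA_go]
  | cons c sc' ih =>
    intro i acc
    rw [List.findIdx?_cons]
    by_cases hd : pvB_isDropdown c = true
    · -- c is the dropdown child: A breaks here, B's findIdx? returns 0
      have hid : pvId c = some "attribute-type-dropdown" := by
        simpa [pvB_isDropdown] using hd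
      simp only [hd, if_true]
      show pvA_go (c :: sc') i acc = (some (i + ((0 : Nat) : Int)), ([] : List _).foldl pvB_step acc)
      simp only [pvA_go, hid, if_neg pv_dropdown_not_attr]
      simp
    · have hd' : pvB_isDropdown c = false := by simpa using hd
      have hstep : ∀ acc', pvA_go (c :: sc') i acc' = pvA_go sc' (i + 1) (pvB_step acc' c) := by
        intro acc'
        cases hid : pvId c with
        | none => simp only [pvA_go, pvB_step, hid]
        | some id =>
          simp only [pvA_go, pvB_step, hid]
          by_cases hin : PySem.Str.isIn "attr_row_index" id = true
          · rw [if_pos hin, if_pos hin]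
          · have hne : id ≠ "attribute-type-dropdown" := by
              intro h; rw [pvB_isDropdown, hid, h] at hd'; simp at hd'
            rw [if_neg hin, if_neg hin, if_neg hne]
      rw [hstep, ih (i + 1) (pvB_step acc c)]
      simp only [hd', Bool.false_eq_true, if_false]
      cases hfi : sc'.findIdx? pvB_isDropdown with
      | none => simp
      | some j =>
        simp only [Option.map_some, List.take_succ_cons, List.foldl_cons, Prod.mk.injEq]
        have hcast : (((j + 1 : Nat)) : Int) = (j : Int) + 1 := by push_cast; ring
        rw [hcast]
        exact ⟨by ring, trivial⟩

-- ===== VERDICT (by name: the statement is the Claim_ definition above) =====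
theorem get_insert_row_idx_spec : Claim_equal_get_insert_row_idx := by
  intro sc _ _
  unfold Spec_get_insert_row_idx get_insert_row_idx get_insert_row_idx_alt
  rw [pvA_go_eq sc 0 none]
  cases hfi : sc.findIdx? pvB_isDropdown with
  | none => rfl
  | some j =>
    simp only [zero_add]
    cases (sc.take j).foldl pvB_step none <;> rfl
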